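-- pv_equiv track=rewrite | github.com/pawamoy/duty | src/duty/_internal/cli.py | split_args
-- ===== SOURCE A (Python) =====
-- def split_args(args: list[str], names: list[str]) -> list[list[str]]:
--     """Split command line arguments into duty commands.
--
--     Parameters:
--         args: The CLI arguments.
--         names: The known duty names.
--
--     Raises:
--         ValueError: When a duty name is missing before an argument,
--             or when the duty name is unknown.
--
--     Returns:
--         The split commands.
--     """
--     arg_lists = []
--     current_arg_list: list[str] = []
--
--     for arg in args:
--         if arg in names:
--             # We found a duty name.
--             if current_arg_list:
--                 # Append the previous arg list to the result and reset it.
--                 arg_lists.append(current_arg_list)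
--                 current_arg_list = []
--             current_arg_list.append(arg)
--         elif current_arg_list:
--             # We found an argument.
--             current_arg_list.append(arg)
--         else:
--             # We found an argument but no duty name.
--             raise ValueError(f"> Missing duty name before argument '{arg}', or unknown duty name")
--
--     # Don't forget the last arg list.
--     if current_arg_list:
--         arg_lists.append(current_arg_list)
--
--     return arg_lists
-- ===== SOURCE B (Python) =====
-- def split_args(args: list[str], names: list[str]) -> list[list[str]]:
--     """Split command line arguments into duty commands (boundary-index slicing)."""
--     bounds = [i for i, arg in enumerate(args) if arg in names]
--     if args and bounds[:1] != [0]: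
--         raise ValueError(f"> Missing duty name before argument '{args[0]}', or unknown duty name")
--     ends = bounds[1:] + [len(args)]
--     return [args[i:j] for i, j in zip(bounds, ends)]
-- ===== Notes on version B (the rewrite author's own statement) =====
-- stated objective: alternative
-- what changed: Replaces A's single stateful pass (accumulator of the current group, flushed at each known name) with a boundary-index scan followed by slicing: collect the indices where the element is a known name, validate that index 0 is a boundary, then emit args[i:j] for consecutive boundary pairs.
import Mathlib
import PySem

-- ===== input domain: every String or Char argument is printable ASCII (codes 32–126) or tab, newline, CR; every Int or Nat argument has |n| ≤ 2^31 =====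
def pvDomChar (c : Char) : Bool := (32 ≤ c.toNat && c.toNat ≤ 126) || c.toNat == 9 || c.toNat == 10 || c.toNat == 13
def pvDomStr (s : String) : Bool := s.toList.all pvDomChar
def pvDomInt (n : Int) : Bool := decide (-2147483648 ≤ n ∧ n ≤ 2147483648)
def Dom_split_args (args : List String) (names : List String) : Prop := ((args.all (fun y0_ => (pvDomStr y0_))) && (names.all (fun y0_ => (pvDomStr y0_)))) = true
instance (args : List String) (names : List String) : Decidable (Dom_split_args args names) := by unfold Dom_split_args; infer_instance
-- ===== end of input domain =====

-- B replaces A's stateful accumulator pass with a boundary-index scan plus slicing (alternative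
-- decomposition, same cost); both raise ValueError exactly when args is non-empty and args[0] is
-- not a known name, so Pre_ excludes exactly those inputs (neither program returns there).

-- ===== PORT A =====
-- the for-loop: state = (arg_lists, current_arg_list); none = the explicit ValueError
def splitLoopA (names : List String) : List String → List (List String) → List String →
    Option (List (List String) × List String)
  | [], arg_lists, cur => some (arg_lists, cur)
  | a :: rest, arg_lists, cur =>
    if names.contains a then
      if cur ≠ [] then splitLoopA names rest (arg_lists ++ [cur]) [a]
      else splitLoopA names rest arg_lists (cur ++ [a])
    else if cur ≠ [] then splitLoopA names rest arg_lists (cur ++ [a])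
    else none

-- the epilogue: "Don't forget the last arg list"; the none case is unreachable inside Pre_
def finishA (r : Option (List (List String) × List String)) : List (List String) :=
  match r with
  | some (arg_lists, cur) => if cur ≠ [] then arg_lists ++ [cur] else arg_lists
  | none => []

def split_args (args : List String) (names : List String) : List (List String) :=
  finishA (splitLoopA names args [] [])

-- ===== PORT B =====
def split_args_alt (args : List String) (names : List String) : List (List String) :=
  let bounds : List Int :=
    ((PySem.List.enumerate args 0).filter (fun p => names.contains p.2)).map (fun p => p.1)
  if args ≠ [] ∧ PySem.List.slice bounds none (some 1) ≠ [(0 : Int)] then []  -- raise ValueError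
  else
    let ends : List Int := PySem.List.slice bounds (some 1) none ++ [(args.length : Int)]
    (bounds.zip ends).map (fun p => PySem.List.slice args (some p.1) (some p.2))

-- ===== PRECONDITION & SPEC =====
-- Pre_ excludes exactly the inputs on which Python A raises ValueError (args non-empty and
-- args[0] not a known duty name); B raises the same ValueError there.
def Pre_split_args (args : List String) (names : List String) : Prop :=
  (args.head?.all (fun h => names.contains h)) = true
instance (args : List String) (names : List String) : Decidable (Pre_split_args args names) := by
  unfold Pre_split_args; infer_instance
def pvWitness_split_args : List String × List String :=
  (["build", "-v", "docs", "serve", "--port", "80"], ["build", "docs", "check"])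
def Spec_split_args (args : List String) (names : List String) (out : List (List String)) : Prop :=
  out = split_args_alt args names
instance (args : List String) (names : List String) (out : List (List String)) :
    Decidable (Spec_split_args args names out) := by unfold Spec_split_args; infer_instance

-- ===== CLAIM (what is proved, stated in full; the proofs are below) =====
def Claim_equal_split_args : Prop := ∀ (args : List String) (names : List String),
  Dom_split_args args names → Pre_split_args args names →
  Spec_split_args args names (split_args args names)

-- ===== LEMMAS AND PROOFS =====

-- common reference form: the list of duty-command groups
def dutyGroups (names : List String) : List String → List (List String)
  | [] => []
  | h :: t =>
      (h :: t.takeWhile (fun a => !names.contains a)) ::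
        dutyGroups names (t.dropWhile (fun a => !names.contains a))
termination_by l => l.length
decreasing_by
  simpa using Nat.lt_succ_of_le (List.length_dropWhile_le _ _)

theorem dutyGroups_nil (names : List String) : dutyGroups names [] = [] := by
  rw [dutyGroups]

theorem dutyGroups_cons (names : List String) (h : String) (t : List String) :
    dutyGroups names (h :: t) =
      (h :: t.takeWhile (fun a => !names.contains a)) ::
        dutyGroups names (t.dropWhile (fun a => !names.contains a)) := by
  rw [dutyGroups]

-- ---------- A side ----------
theorem loopA_spec (names : List String) : ∀ (l : List String) (acc : List (List String))
    (cur : List String), cur ≠ [] →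
    finishA (splitLoopA names l acc cur) =
      acc ++ ((cur ++ l.takeWhile (fun a => !names.contains a)) ::
              dutyGroups names (l.dropWhile (fun a => !names.contains a))) := by
  intro l
  induction l with
  | nil =>
      intro acc cur hcur
      simp [splitLoopA, finishA, hcur, dutyGroups_nil]
  | cons a rest ih =>
      intro acc cur hcur
      by_cases ha : names.contains a = true
      · have ha' : a ∈ names := by simpa using ha
        rw [show splitLoopA names (a :: rest) acc cur = splitLoopA names rest (acc ++ [cur]) [a]
            from by simp [splitLoopA, ha, ha', hcur]]
        rw [ih (acc ++ [cur]) [a] (by simp)]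
        simp [List.takeWhile_cons, List.dropWhile_cons, ha', dutyGroups_cons]
      · have ha' : a ∉ names := by simpa using ha
        rw [show splitLoopA names (a :: rest) acc cur = splitLoopA names rest acc (cur ++ [a])
            from by simp [splitLoopA, ha, ha', hcur]]
        rw [ih acc (cur ++ [a]) (by simp)]
        simp [List.takeWhile_cons, List.dropWhile_cons, ha']

theorem split_args_eq_groups (names : List String) (h : String) (t : List String)
    (hh : names.contains h = true) :
    split_args (h :: t) names = dutyGroups names (h :: t) := by
  unfold split_args
  have hh' : h ∈ names := by simpa using hh
  have : splitLoopA names (h :: t) [] [] = splitLoopA names t [] [h] := by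
    simp [splitLoopA, hh']
  rw [this, loopA_spec names t [] [h] (by simp), dutyGroups_cons]
  simp

-- ---------- B side ----------
-- boundary indices, as naturals
def natBounds (names : List String) : List String → List Nat
  | [] => []
  | x :: xs => (if names.contains x then [0] else []) ++ (natBounds names xs).map (· + 1)

-- the slicing comprehension, in nat form
def zmN (args : List String) (bs : List Nat) : List (List String) :=
  (bs.zip (bs.tail ++ [args.length])).map (fun p => (args.drop p.1).take (p.2 - p.1))

theorem intBounds_eq (names : List String) : ∀ (xs : List String) (s : Int),
    ((PySem.List.enumerate xs s).filter (fun p => names.contains p.2)).map (fun p => p.1) =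
      (natBounds names xs).map (fun k : Nat => s + (k : Int)) := by
  intro xs
  induction xs with
  | nil => intro s; simp [PySem.List.enumerate_nil, natBounds]
  | cons x xs ih =>
      intro s
      rw [PySem.List.enumerate_cons]
      have htail : ((natBounds names xs).map (· + 1)).map (fun k : Nat => s + (k : Int)) =
          (natBounds names xs).map (fun k : Nat => (s + 1) + (k : Int)) := by
        rw [List.map_map]
        exact List.map_congr_left (fun k _ => by simp only [Function.comp]; push_cast; ring)
      by_cases hx : names.contains x = true
      · have hx' : x ∈ names := by simpa using hx
        have hfx : (fun p : Int × String => names.contains p.2) (s, x) = true := hx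
        rw [List.filter_cons, if_pos hfx, List.map_cons, ih (s + 1)]
        rw [show natBounds names (x :: xs) = [0] ++ (natBounds names xs).map (· + 1) from by
          simp [natBounds, hx']]
        rw [List.map_append, htail]
        simp
      · have hx' : x ∉ names := by simpa using hx
        have hfx : ¬ (fun p : Int × String => names.contains p.2) (s, x) = true := hx
        rw [List.filter_cons, if_neg hfx, ih (s + 1)]
        rw [show natBounds names (x :: xs) = (natBounds names xs).map (· + 1) from by
          simp [natBounds, hx']]
        rw [htail]

theorem zm_int_nat (args : List String) (nb : List Nat) :
    ((nb.map (fun k : Nat => (k : Int))).zip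
        ((nb.map (fun k : Nat => (k : Int))).tail ++ [(args.length : Int)])).map
      (fun p => PySem.List.slice args (some p.1) (some p.2)) = zmN args nb := by
  have ht : (nb.map (fun k : Nat => (k : Int))).tail ++ [(args.length : Int)] =
      (nb.tail ++ [args.length]).map (fun k : Nat => (k : Int)) := by
    cases nb <;> simp
  rw [ht, List.zip_map, zmN, List.map_map]
  refine List.map_congr_left (fun p _ => ?_)
  simp [Function.comp, PySem.List.slice_natCast]

theorem zmN_cons_cons (args : List String) (b c : Nat) (bs : List Nat) :
    zmN args (b :: c :: bs) = (args.drop b).take (c - b) :: zmN args (c :: bs) := by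
  simp [zmN]

theorem zmN_singleton (args : List String) (b : Nat) :
    zmN args [b] = [(args.drop b).take (args.length - b)] := by
  simp [zmN]

theorem zmN_shift (u v : List String) : ∀ (bs : List Nat),
    zmN (u ++ v) (bs.map (· + u.length)) = zmN v bs := by
  intro bs
  have ht : (bs.map (· + u.length)).tail ++ [(u ++ v).length] =
      (bs.tail ++ [v.length]).map (· + u.length) := by
    cases bs <;> simp [Nat.add_comm]
  rw [zmN, ht, List.zip_map, List.map_map, zmN]
  refine List.map_congr_left (fun p _ => ?_)
  simp only [Function.comp, Prod.map]
  rw [List.drop_append, List.drop_eq_nil_of_le (by omega), List.nil_append]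
  have e1 : p.1 + u.length - u.length = p.1 := by omega
  have e2 : p.2 + u.length - (p.1 + u.length) = p.2 - p.1 := by omega
  rw [e1, e2]

theorem natBounds_clean_append (names : List String) : ∀ (u v : List String),
    (∀ x ∈ u, names.contains x = false) →
    natBounds names (u ++ v) = (natBounds names v).map (· + u.length) := by
  intro u
  induction u with
  | nil => intro v _; simp
  | cons x u ih =>
      intro v hclean
      have hx : names.contains x = false := hclean x (by simp)
      simp only [List.cons_append, natBounds, hx, Bool.false_eq_true, if_false, List.nil_append,
        ih v (fun y hy => hclean y (by simp [hy])), List.map_map]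
      refine List.map_congr_left (fun k _ => ?_)
      simp [Function.comp]
      omega

theorem dropWhile_head_false {α : Type} (p : α → Bool) : ∀ (l : List α) (x : α) (xs : List α),
    l.dropWhile p = x :: xs → p x = false := by
  intro l
  induction l with
  | nil => intro x xs h; simp [List.dropWhile] at h
  | cons a l ih =>
      intro x xs h
      by_cases ha : p a = true
      · rw [List.dropWhile_cons_of_pos ha] at h; exact ih x xs h
      · rw [List.dropWhile_cons_of_neg (by simp_all)] at h
        cases h; simp_all

theorem zmN_eq_groups (names : List String) : ∀ (n : Nat) (t : List String), t.length ≤ n →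
    ∀ (h : String), names.contains h = true →
    zmN (h :: t) (0 :: (natBounds names t).map (· + 1)) = dutyGroups names (h :: t) := by
  intro n
  induction n with
  | zero =>
      intro t ht h hh
      have : t = [] := by cases t <;> simp_all
      subst this
      simp [natBounds, zmN_singleton, dutyGroups_cons, dutyGroups_nil]
  | succ m ih =>
      intro t ht h hh
      set p : String → Bool := fun a => !names.contains a with hp
      have hsplit : t.takeWhile p ++ t.dropWhile p = t := List.takeWhile_append_dropWhile
      have hclean : ∀ x ∈ t.takeWhile p, names.contains x = false := by
        intro x hx
        have := List.mem_takeWhile_imp hx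
        simpa [hp] using this
      have hnb : natBounds names t =
          (natBounds names (t.dropWhile p)).map (· + (t.takeWhile p).length) := by
        conv_lhs => rw [← hsplit]
        exact natBounds_clean_append names _ _ hclean
      cases hv : t.dropWhile p with
      | nil =>
          have hb : natBounds names t = [] := by rw [hnb, hv]; simp [natBounds]
          have htu : t.takeWhile p = t := by
            have h0 := hsplit
            rw [hv] at h0
            simpa using h0
          rw [hb]
          simp only [List.map_nil]
          rw [zmN_singleton]
          rw [dutyGroups_cons names h t, ← hp, hv, dutyGroups_nil, htu]
          simp
      | cons nh r =>
          have hnh : names.contains nh = true := by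
            have := dropWhile_head_false p t nh r hv
            simpa [hp] using this
          have hnh' : nh ∈ names := by simpa using hnh
          have hnbv : natBounds names (t.dropWhile p) =
              0 :: (natBounds names r).map (· + 1) := by
            rw [hv]; simp [natBounds, hnh']
          set j : Nat := (t.takeWhile p).length with hj
          -- the boundary list of h :: t
          have hbs : (natBounds names t).map (· + 1) =
              (j + 1) :: ((natBounds names r).map (· + 1)).map (· + (j + 1)) := by
            rw [hnb, hnbv]
            simp only [List.map_cons, List.map_map, List.cons.injEq]
            exact ⟨by omega,
              List.map_congr_left (fun k _ => by simp only [Function.comp]; omega)⟩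
          rw [hbs, zmN_cons_cons]
          -- first chunk is h :: takeWhile
          have hfirst : ((h :: t).drop 0).take (j + 1 - 0) = h :: t.takeWhile p := by
            simp only [List.drop_zero, Nat.sub_zero, List.take_succ_cons]
            have h4 : List.take (t.takeWhile p).length (t.takeWhile p ++ t.dropWhile p) =
                t.takeWhile p := List.take_left
            rw [hsplit] at h4
            rw [hj, h4]
          -- the rest shifts onto dropWhile
          have hrest : zmN (h :: t) ((j + 1) ::
                ((natBounds names r).map (· + 1)).map (· + (j + 1))) =
              zmN (nh :: r) (0 :: (natBounds names r).map (· + 1)) := by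
            have hcons : (j + 1) :: ((natBounds names r).map (· + 1)).map (· + (j + 1)) =
                (0 :: (natBounds names r).map (· + 1)).map (· + (j + 1)) := by simp
            have hht : h :: t = (h :: t.takeWhile p) ++ (nh :: r) := by
              rw [← hv]; simp [hsplit]
            have hlen : (h :: t.takeWhile p).length = j + 1 := by simp [hj]
            rw [hcons, hht, ← hlen, zmN_shift]
          have hr : r.length ≤ m := by
            have h1 : (t.dropWhile p).length ≤ t.length := List.length_dropWhile_le _ _
            rw [hv] at h1; simp at h1; omega
          rw [hrest, ih r hr nh hnh, hfirst]
          conv_rhs => rw [dutyGroups_cons names h t]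
          rw [← hp, hv]

theorem alt_eq_groups (names : List String) (h : String) (t : List String)
    (hh : names.contains h = true) :
    split_args_alt (h :: t) names = dutyGroups names (h :: t) := by
  unfold split_args_alt
  have hb : ((PySem.List.enumerate (h :: t) 0).filter (fun p => names.contains p.2)).map
      (fun p => p.1) = (natBounds names (h :: t)).map (fun k : Nat => (k : Int)) := by
    rw [intBounds_eq names (h :: t) 0]
    exact List.map_congr_left (fun k _ => by omega)
  have hh' : h ∈ names := by simpa using hh
  have hnb : natBounds names (h :: t) = 0 :: (natBounds names t).map (· + 1) := by
    simp [natBounds, hh']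
  rw [hb, hnb]
  have hcond : ¬ ((h :: t ≠ []) ∧
      PySem.List.slice ((((0 : Nat) :: (natBounds names t).map (· + 1)).map
        (fun k : Nat => (k : Int)))) none (some 1) ≠ [(0 : Int)]) := by
    rw [PySem.List.slice_to _ (show (0:Int) ≤ 1 by norm_num)]
    simp
  rw [if_neg hcond]
  have hends : PySem.List.slice (((0 : Nat) :: (natBounds names t).map (· + 1)).map
      (fun k : Nat => (k : Int))) (some 1) none =
      (((0 : Nat) :: (natBounds names t).map (· + 1)).map (fun k : Nat => (k : Int))).tail := by
    rw [PySem.List.slice_from _ (show (0:Int) ≤ 1 by norm_num)]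
    simp
  rw [hends, zm_int_nat]
  exact zmN_eq_groups names t.length t (le_refl _) h hh

-- ===== VERDICT (by name: the statement is the Claim_ definition above) =====
theorem split_args_spec : Claim_equal_split_args := by
  intro args names _hdom hpre
  unfold Spec_split_args
  cases args with
  | nil => rfl
  | cons h t =>
      have hh : names.contains h = true := by
        simpa [Pre_split_args] using hpre
      rw [split_args_eq_groups names h t hh, alt_eq_groups names h t hh]
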